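-- pv_equiv track=rewrite | github.com/yukwanwoo/Smart-contract-detection-test | model/modules/backdoor_code_inspector.py | has_state_change_after_call
-- ===== SOURCE A (Python) =====
-- def has_state_change_after_call(func_str, call_type):
--     lines = func_str.strip().split('\n')
--     call_found = False
--     for line in lines:
--         line = line.strip()
--         if call_type in line:
--             call_found = True
--         elif call_found:
--             if any(op in line for op in ['+=', '-=', '=']):
--                 return True
--     return False
-- ===== SOURCE B (Python) =====
-- def _idx(pred, lines):
--     return [i for i, l in enumerate(lines) if pred(l)]
--
--
-- def has_state_change_after_call(func_str, call_type):
--     lines = [l.strip() for l in func_str.strip().split('\n')]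
--     calls = _idx(lambda l: call_type in l, lines)
--     writes = _idx(lambda l: call_type not in l and '=' in l, lines)
--     return bool(calls) and bool(writes) and calls[0] < writes[-1]
-- ===== Notes on version B (the rewrite author's own statement) =====
-- stated objective: alternative
-- what changed: B replaces A's stateful call_found scan with an index-set formulation: it collects the indices of call lines and of assignment lines (collapsing A's ['+=','-=','='] list to the subsuming '='), and answers by comparing the first call index with the last assignment index.
import Mathlib
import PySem

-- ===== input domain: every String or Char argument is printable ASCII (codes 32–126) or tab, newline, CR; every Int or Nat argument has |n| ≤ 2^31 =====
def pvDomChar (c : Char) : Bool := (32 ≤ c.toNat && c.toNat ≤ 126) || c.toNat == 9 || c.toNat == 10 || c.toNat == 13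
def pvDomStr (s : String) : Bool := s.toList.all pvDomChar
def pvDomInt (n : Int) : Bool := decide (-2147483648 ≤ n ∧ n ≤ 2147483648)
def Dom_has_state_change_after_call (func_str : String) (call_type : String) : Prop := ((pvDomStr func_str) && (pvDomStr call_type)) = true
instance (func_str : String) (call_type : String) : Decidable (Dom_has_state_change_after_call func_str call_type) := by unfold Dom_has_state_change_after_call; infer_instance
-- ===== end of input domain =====

-- B answers via an index-set formulation: collect the indices of call lines and of
-- assignment lines ('=' subsumes A's '+='/'-=') and compare first call index with
-- last assignment index; same return value as A everywhere.


-- ===== PORT A =====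
-- A's loop with its call_found state, branches in source order
def pvLoopA (ct : List Char) : List (List Char) → Bool → Bool
  | [], _ => false
  | l :: rest, call_found =>
      let line := PySem.Chars.strip l
      if PySem.Chars.isIn ct line then pvLoopA ct rest true
      else if call_found then
        if [['+', '='], ['-', '='], ['=']].any (fun op => PySem.Chars.isIn op line) then true
        else pvLoopA ct rest call_found
      else pvLoopA ct rest call_found

def has_state_change_after_call (func_str : String) (call_type : String) : Bool :=
  let lines := PySem.Chars.splitOn (PySem.Chars.strip func_str.toList) ['\n']
  pvLoopA call_type.toList lines false

-- ===== PORT B =====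
-- Source B's _idx helper: the indices (via enumerate) of the lines satisfying pred
def pvIdx (pred : List Char → Bool) (s : Int) (ls : List (List Char)) : List Int :=
  (PySem.List.enumerate ls s).filterMap (fun q => if pred q.2 then some q.1 else none)

def has_state_change_after_call_alt (func_str : String) (call_type : String) : Bool :=
  let ct := call_type.toList
  let lines := (PySem.Chars.splitOn (PySem.Chars.strip func_str.toList) ['\n']).map PySem.Chars.strip
  let calls := pvIdx (fun l => PySem.Chars.isIn ct l) 0 lines
  let writes := pvIdx (fun l => !(PySem.Chars.isIn ct l) && PySem.Chars.isIn ['='] l) 0 lines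
  -- bool(calls) and bool(writes) and calls[0] < writes[-1]
  match calls.head?, writes.getLast? with
  | some c, some w => decide (c < w)
  | _, _ => false

-- ===== PRECONDITION & SPEC =====
def Spec_has_state_change_after_call (func_str : String) (call_type : String) (out : Bool) : Prop := out = has_state_change_after_call_alt func_str call_type
instance (func_str : String) (call_type : String) (out : Bool) : Decidable (Spec_has_state_change_after_call func_str call_type out) := by unfold Spec_has_state_change_after_call; infer_instance

-- ===== CLAIM (what is proved, stated in full; the proofs are below) =====
def Claim_equal_has_state_change_after_call : Prop := ∀ (func_str : String) (call_type : String), Dom_has_state_change_after_call func_str call_type → Spec_has_state_change_after_call func_str call_type (has_state_change_after_call func_str call_type)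

-- ===== LEMMAS AND PROOFS =====

-- '+=' in l or '-=' in l already implies '=' in l, so A's 3-way any is just '=' in l
theorem pvOps_eq_eq (l : List Char) :
    ([['+', '='], ['-', '='], ['=']].any (fun op => PySem.Chars.isIn op l))
      = PySem.Chars.isIn ['='] l := by
  simp only [List.any_cons, List.any_nil, Bool.or_false]
  cases h : PySem.Chars.isIn ['='] l with
  | true => simp
  | false =>
      simp only [Bool.or_false, Bool.or_eq_false_iff]
      rw [PySem.Chars.isIn_eq_false_iff] at h
      constructor <;>
      · rw [PySem.Chars.isIn_eq_false_iff]
        intro hinf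
        exact h (List.IsInfix.trans (by decide) hinf)

theorem pvIdx_cons (pred : List Char → Bool) (s : Int) (l : List Char) (rest : List (List Char)) :
    pvIdx pred s (l :: rest)
      = if pred l then s :: pvIdx pred (s+1) rest else pvIdx pred (s+1) rest := by
  simp only [pvIdx, PySem.List.enumerate_cons, List.filterMap_cons]
  split <;> simp_all

theorem pvIdx_mem_ge (pred : List Char → Bool) (ls : List (List Char)) :
    ∀ (s : Int) (x : Int), x ∈ pvIdx pred s ls → s ≤ x := by
  induction ls with
  | nil => intro s x hx; simp [pvIdx] at hx
  | cons l rest ih =>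
      intro s x hx
      rw [pvIdx_cons] at hx
      split at hx
      · rcases List.mem_cons.1 hx with h | h
        · omega
        · have := ih (s+1) x h; omega
      · have := ih (s+1) x hx; omega

theorem pvIdx_eq_nil_iff (pred : List Char → Bool) (ls : List (List Char)) :
    ∀ s : Int, (pvIdx pred s ls = [] ↔ ls.any pred = false) := by
  induction ls with
  | nil => intro s; simp [pvIdx]
  | cons l rest ih =>
      intro s
      rw [pvIdx_cons]
      by_cases h : pred l = true <;> simp [h, ih (s+1)]

-- the judge B computes from the two index lists, with an arbitrary start index
def pvJudge (ct : List Char) (s : Int) (ls : List (List Char)) : Bool :=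
  match (pvIdx (fun l => PySem.Chars.isIn ct l) s ls).head?,
        (pvIdx (fun l => !(PySem.Chars.isIn ct l) && PySem.Chars.isIn ['='] l) s ls).getLast? with
  | some c, some w => decide (c < w)
  | _, _ => false

-- B's filtered any over the tail (bridge between the two formulations)
theorem pvTailAny_eq_judge (ct : List Char) (rest : List (List Char)) (s : Int) :
    rest.any (fun m => !(PySem.Chars.isIn ct m) && PySem.Chars.isIn ['='] m)
      = (match (pvIdx (fun l => !(PySem.Chars.isIn ct l) && PySem.Chars.isIn ['='] l) (s+1) rest).getLast? with
         | some w => decide (s < w)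
         | none => false) := by
  cases hW : (pvIdx (fun l => !(PySem.Chars.isIn ct l) && PySem.Chars.isIn ['='] l) (s+1) rest).getLast? with
  | none =>
      have : pvIdx (fun l => !(PySem.Chars.isIn ct l) && PySem.Chars.isIn ['='] l) (s+1) rest = [] := by
        cases h : pvIdx (fun l => !(PySem.Chars.isIn ct l) && PySem.Chars.isIn ['='] l) (s+1) rest with
        | nil => rfl
        | cons a t => rw [h] at hW; simp [List.getLast?_eq_some_getLast] at hW
      simp [(pvIdx_eq_nil_iff _ rest (s+1)).1 this]
  | some w =>
      have hw_mem : w ∈ pvIdx (fun l => !(PySem.Chars.isIn ct l) && PySem.Chars.isIn ['='] l) (s+1) rest :=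
        List.mem_of_getLast? hW
      have hge := pvIdx_mem_ge _ rest (s+1) w hw_mem
      have hne : pvIdx (fun l => !(PySem.Chars.isIn ct l) && PySem.Chars.isIn ['='] l) (s+1) rest ≠ [] := by
        intro h; rw [h] at hW; simp at hW
      have hany : rest.any (fun m => !(PySem.Chars.isIn ct m) && PySem.Chars.isIn ['='] m) = true := by
        by_contra h
        exact hne ((pvIdx_eq_nil_iff _ rest (s+1)).2 (Bool.not_eq_true _ ▸ (by simpa using h)))
      simp only [hany]
      have : s < w := by omega
      simp [this]

-- A's loop with call_found already true is the filtered any over the tail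
theorem pvLoopA_true (ct : List Char) (ls : List (List Char)) :
    pvLoopA ct ls true
      = ls.any (fun m => !(PySem.Chars.isIn ct (PySem.Chars.strip m))
                          && PySem.Chars.isIn ['='] (PySem.Chars.strip m)) := by
  induction ls with
  | nil => rfl
  | cons l rest ih =>
      simp only [pvLoopA]
      rw [pvOps_eq_eq]
      simp only [List.any_cons]
      by_cases h : PySem.Chars.isIn ct (PySem.Chars.strip l) = true
      · simp [h, ih]
      · simp only [Bool.not_eq_true] at h
        by_cases h2 : PySem.Chars.isIn ['='] (PySem.Chars.strip l) = true
        · simp [h, h2]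
        · simp only [Bool.not_eq_true] at h2
          simp [h, h2, ih]

-- main bridge: A's loop (flag false) equals B's first-call/last-write judge
theorem pvLoopA_false (ct : List Char) (ls : List (List Char)) :
    ∀ s : Int, pvLoopA ct ls false = pvJudge ct s (ls.map PySem.Chars.strip) := by
  induction ls with
  | nil => intro s; rfl
  | cons l rest ih =>
      intro s
      simp only [pvLoopA, List.map_cons, pvJudge, pvIdx_cons]
      by_cases h : PySem.Chars.isIn ct (PySem.Chars.strip l) = true
      · -- call found on this line: head? calls = some s
        simp only [h, if_true, Bool.not_true, Bool.false_and, if_neg (by simp : ¬ (false = true)),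
          List.head?_cons]
        rw [pvLoopA_true]
        show (rest.any ((fun m => !(PySem.Chars.isIn ct m) && PySem.Chars.isIn ['='] m) ∘ PySem.Chars.strip)) = _
        rw [← List.any_map, pvTailAny_eq_judge ct (rest.map PySem.Chars.strip) s]
        cases (pvIdx (fun l => !(PySem.Chars.isIn ct l) && PySem.Chars.isIn ['='] l) (s+1) (rest.map PySem.Chars.strip)).getLast? <;> rfl
      · simp only [Bool.not_eq_true] at h
        simp only [h, Bool.not_false, Bool.true_and, if_neg (by simp : ¬ (false = true))]
        by_cases h2 : PySem.Chars.isIn ['='] (PySem.Chars.strip l) = true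
        · -- write line before any call: prepended to writes; harmless for the judge
          simp only [h2, if_true]
          rw [ih (s+1)]
          unfold pvJudge
          cases hC : (pvIdx (fun l => PySem.Chars.isIn ct l) (s+1) (rest.map PySem.Chars.strip)).head? with
          | none => simp
          | some c =>
              have hc_mem : c ∈ pvIdx (fun l => PySem.Chars.isIn ct l) (s+1) (rest.map PySem.Chars.strip) :=
                List.mem_of_mem_head? hC
              have hcge := pvIdx_mem_ge _ (rest.map PySem.Chars.strip) (s+1) c hc_mem
              cases hW : (pvIdx (fun l => !(PySem.Chars.isIn ct l) && PySem.Chars.isIn ['='] l) (s+1) (rest.map PySem.Chars.strip)).getLast? with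
              | none =>
                  have hnil : pvIdx (fun l => !(PySem.Chars.isIn ct l) && PySem.Chars.isIn ['='] l) (s+1) (rest.map PySem.Chars.strip) = [] := by
                    cases hx : pvIdx (fun l => !(PySem.Chars.isIn ct l) && PySem.Chars.isIn ['='] l) (s+1) (rest.map PySem.Chars.strip) with
                    | nil => rfl
                    | cons a t => rw [hx] at hW; simp [List.getLast?_eq_some_getLast] at hW
                  rw [hnil]
                  simp only [List.getLast?_singleton]
                  have : ¬ (c < s) := by omega
                  simp [this]
              | some w =>
                  have hne : pvIdx (fun l => !(PySem.Chars.isIn ct l) && PySem.Chars.isIn ['='] l) (s+1) (rest.map PySem.Chars.strip) ≠ [] := by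
                    intro hx; rw [hx] at hW; simp at hW
                  have hcons : (s :: pvIdx (fun l => !(PySem.Chars.isIn ct l) && PySem.Chars.isIn ['='] l) (s+1) (rest.map PySem.Chars.strip)).getLast?
                      = (pvIdx (fun l => !(PySem.Chars.isIn ct l) && PySem.Chars.isIn ['='] l) (s+1) (rest.map PySem.Chars.strip)).getLast? := by
                    cases hx : pvIdx (fun l => !(PySem.Chars.isIn ct l) && PySem.Chars.isIn ['='] l) (s+1) (rest.map PySem.Chars.strip) with
                    | nil => exact absurd hx hne
                    | cons a t => rw [List.getLast?_cons_cons]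
                  rw [hcons, hW]
        · simp only [Bool.not_eq_true] at h2
          simp only [h2, if_neg (by simp : ¬ (false = true))]
          exact ih (s+1)

-- ===== VERDICT (by name: the statement is the Claim_ definition above) =====
theorem has_state_change_after_call_spec : Claim_equal_has_state_change_after_call := by
  intro func_str call_type _
  unfold Spec_has_state_change_after_call has_state_change_after_call has_state_change_after_call_alt
  exact pvLoopA_false call_type.toList _ 0
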